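-- pv_equiv track=rewrite | github.com/MohamedKeteb/Projet_graph_py | delivery_network/graph.py | process
-- ===== SOURCE A (Python) =====
-- import math
--
-- def process(tree):
-- # tree orienté des enfants vers les parents
--     N=len(tree)
--     up={k: [(-1,0) for i in range(int(math.log2(N))+1)] for k in tree.keys()}
--     for v in tree.keys():
--         up[v][0]=(tree[v][0][0],tree[v][0][1])
--     for j in range(1,int(math.log2(N))+1):
--         for v in tree.keys():
--             if up[v][j-1][0]!=-1 and up[up[v][j-1][0]][j-1][0]!=-1:
--                 up[v][j]=up[up[v][j-1][0]][j-1][0],max(up[v][j-1][1],up[up[v][j-1][0]][j-1][1])  # ces deux conditions permettent de ne pas sortir de l'arbre dans le premier et le deuxième saut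
--     return up # une relation de récurrence montre que pour atteindre l'ancêtre
-- ===== SOURCE B (Python) =====
-- import math
--
-- def process(tree):
--     # memoized top-down recursion instead of the level-by-level table fill
--     N = len(tree)
--     L = int(math.log2(N)) + 1
--     memo = {}
--
--     def get(v, j):
--         if (v, j) in memo:
--             return memo[(v, j)]
--         if j == 0:
--             r = (tree[v][0][0], tree[v][0][1])
--         else:
--             p, w = get(v, j - 1)
--             if p != -1:
--                 p2, w2 = get(p, j - 1)
--                 r = (p2, max(w, w2)) if p2 != -1 else (-1, 0)
--             else:
--                 r = (-1, 0)
--         memo[(v, j)] = r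
--         return r
--
--     return {v: [get(v, j) for j in range(L)] for v in tree}
-- ===== Notes on version B (the rewrite author's own statement) =====
-- stated objective: alternative
-- what changed: Replaces the two imperative level-by-level table-filling loops over a preallocated (-1,0) matrix with a memoized top-down recursion get(v,j) on the binary-lifting recurrence, building each row directly by a comprehension.
-- outside the precondition, e.g. on process({}): A raises ValueError, B raises ValueError
import Mathlib
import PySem

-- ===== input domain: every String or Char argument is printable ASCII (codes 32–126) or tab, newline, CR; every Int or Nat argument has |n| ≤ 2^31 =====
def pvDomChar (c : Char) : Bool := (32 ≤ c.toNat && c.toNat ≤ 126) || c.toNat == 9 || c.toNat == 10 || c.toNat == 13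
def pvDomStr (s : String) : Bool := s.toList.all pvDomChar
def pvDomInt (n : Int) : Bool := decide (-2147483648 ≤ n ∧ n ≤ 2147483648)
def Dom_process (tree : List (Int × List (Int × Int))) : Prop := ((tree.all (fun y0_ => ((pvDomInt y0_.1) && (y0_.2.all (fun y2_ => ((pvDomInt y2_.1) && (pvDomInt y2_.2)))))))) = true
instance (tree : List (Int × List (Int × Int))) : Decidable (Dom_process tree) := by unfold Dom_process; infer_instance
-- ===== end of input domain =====

-- B replaces A's two imperative level-by-level table-filling loops with a memoized top-down
-- recursion on the binary-lifting recurrence (objective: alternative decomposition, same cost).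

-- ===== PORT A =====
-- literal port of A's imperative table fill; dict = PySem.Dict over the assoc list
def process (tree : List (Int × List (Int × Int))) : List (Int × List (Int × Int)) :=
  let N := tree.length
  let L := Nat.log2 N + 1  -- int(math.log2(N)) + 1, exact for list lengths (N ≥ 1 under Pre_)
  let ks := PySem.Dict.keys (PySem.Dict.mk tree)
  -- up = {k: [(-1,0) for i in range(L)] for k in tree.keys()}
  let up0 : PySem.Dict Int (List (Int × Int)) :=
    ks.foldl (fun d k => d.insert k (List.replicate L ((-1 : Int), (0 : Int)))) (PySem.Dict.mk [])
  -- for v in tree.keys(): up[v][0] = (tree[v][0][0], tree[v][0][1])   (tree[v][0] in range under Pre_)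
  let up1 := ks.foldl (fun d v =>
      d.insert v ((d.getD v []).set 0
        (((PySem.Dict.getD (PySem.Dict.mk tree) v []).getD 0 (-1, 0)).1,
         ((PySem.Dict.getD (PySem.Dict.mk tree) v []).getD 0 (-1, 0)).2))) up0
  -- for j in range(1, L): for v in tree.keys(): if up[v][j-1][0] != -1 and up[up[v][j-1][0]][j-1][0] != -1:
  --   up[v][j] = up[up[v][j-1][0]][j-1][0], max(up[v][j-1][1], up[up[v][j-1][0]][j-1][1])
  -- (j ≥ 1 on this range so .toNat is exact; the key up[v][j-1][0] is present under Pre_)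
  let up2 := (PySem.List.pyRange 1 (L : Int) 1).foldl (fun d j =>
      ks.foldl (fun d v =>
        if ((d.getD v []).getD (j - 1).toNat (-1, 0)).1 ≠ -1 then
          if ((d.getD ((d.getD v []).getD (j - 1).toNat (-1, 0)).1 []).getD (j - 1).toNat (-1, 0)).1 ≠ -1 then
            d.insert v ((d.getD v []).set ((j - 1).toNat + 1)
              (((d.getD ((d.getD v []).getD (j - 1).toNat (-1, 0)).1 []).getD (j - 1).toNat (-1, 0)).1,
               max ((d.getD v []).getD (j - 1).toNat (-1, 0)).2
                   ((d.getD ((d.getD v []).getD (j - 1).toNat (-1, 0)).1 []).getD (j - 1).toNat (-1, 0)).2))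
          else d
        else d) d) up1
  up2.items

-- ===== PORT B =====
-- get(v, j) of Source B: recursion on j (the Python memo dict is pure caching of these values)
def pvGetAlt (tree : List (Int × List (Int × Int))) : Nat → Int → Int × Int
  | 0, v =>
    (((PySem.Dict.getD (PySem.Dict.mk tree) v []).getD 0 (-1, 0)).1,
     ((PySem.Dict.getD (PySem.Dict.mk tree) v []).getD 0 (-1, 0)).2)
  | j + 1, v =>
    let p := pvGetAlt tree j v
    if p.1 ≠ -1 then
      let q := pvGetAlt tree j p.1
      if q.1 ≠ -1 then (q.1, max p.2 q.2) else (-1, 0)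
    else (-1, 0)

-- {v: [get(v, j) for j in range(L)] for v in tree}
def process_alt (tree : List (Int × List (Int × Int))) : List (Int × List (Int × Int)) :=
  let L := Nat.log2 tree.length + 1
  (PySem.Dict.keys (PySem.Dict.mk tree)).map
    (fun v => (v, (List.range L).map (fun j => pvGetAlt tree j v)))

-- ===== PRECONDITION & SPEC =====
-- Pre_ excludes exactly the inputs on which A raises: the empty dict (math.log2(0) ValueError), a node
-- with an empty edge list (tree[v][0] IndexError), and — when there are ≥ 2 keys, so the j-loop runs —
-- a first parent that is neither -1 nor a key (up[parent] KeyError).  Nodup of the keys merely mirrors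
-- that a Python dict cannot hold duplicate keys, so it excludes no Python input.
def Pre_process (tree : List (Int × List (Int × Int))) : Prop :=
  tree ≠ [] ∧ (tree.map Prod.fst).Nodup ∧ (∀ p ∈ tree, p.2 ≠ []) ∧
  (1 < tree.length → ∀ p ∈ tree,
    (p.2.headD (-1, 0)).1 = -1 ∨ (p.2.headD (-1, 0)).1 ∈ tree.map Prod.fst)
instance (tree : List (Int × List (Int × Int))) : Decidable (Pre_process tree) := by
  unfold Pre_process; infer_instance

def pvWitness_process : (List (Int × List (Int × Int))) := [(0, [(-1, 5)]), (1, [(0, 3)])]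

def Spec_process (tree : List (Int × List (Int × Int))) (out : List (Int × List (Int × Int))) : Prop := out = process_alt tree
instance (tree : List (Int × List (Int × Int))) (out : List (Int × List (Int × Int))) : Decidable (Spec_process tree out) := by unfold Spec_process; infer_instance

-- ===== CLAIM (what is proved, stated in full; the proofs are below) =====
def Claim_equal_process : Prop := ∀ (tree : List (Int × List (Int × Int))), Dom_process tree → Pre_process tree → Spec_process tree (process tree)

-- ===== LEMMAS AND PROOFS =====

-- the row of node v with levels ≤ j computed and the rest still the (-1, 0) default
def pvRow (tree : List (Int × List (Int × Int))) (L j : Nat) (v : Int) : List (Int × Int) :=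
  (List.range L).map (fun i => if i ≤ j then pvGetAlt tree i v else (-1, 0))

-- the dict state of A's loops: one entry per key, in key order
def pvState (ks : List Int) (h : Int → List (Int × Int)) : PySem.Dict Int (List (Int × Int)) :=
  PySem.Dict.mk (ks.map fun k => (k, h k))

theorem pvGetAlt_succ (tree : List (Int × List (Int × Int))) (j : Nat) (v : Int) :
    pvGetAlt tree (j + 1) v =
      (if (pvGetAlt tree j v).1 ≠ -1 then
        if (pvGetAlt tree j (pvGetAlt tree j v).1).1 ≠ -1 then
          ((pvGetAlt tree j (pvGetAlt tree j v).1).1,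
           max (pvGetAlt tree j v).2 (pvGetAlt tree j (pvGetAlt tree j v).1).2)
        else (-1, 0)
      else (-1, 0)) := rfl

theorem pvState_congr {ks : List Int} {h h' : Int → List (Int × Int)}
    (he : ∀ k ∈ ks, h k = h' k) : pvState ks h = pvState ks h' := by
  unfold pvState
  exact congrArg _ (List.map_congr_left (fun k hk => by rw [he k hk]))

theorem getD_pvState {ks : List Int} {h : Int → List (Int × Int)} {v : Int}
    (hv : v ∈ ks) (d : List (Int × Int)) : (pvState ks h).getD v d = h v := by
  induction ks with
  | nil => cases hv
  | cons a l ih =>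
    rw [show pvState (a :: l) h = PySem.Dict.mk ((a, h a) :: l.map fun k => (k, h k)) from rfl]
    rw [PySem.Dict.getD_eq_get?_getD, PySem.Dict.get?_mk_cons]
    by_cases hav : a = v
    · subst hav; simp
    · simp only [beq_iff_eq, hav, if_false]
      rw [← PySem.Dict.getD_eq_get?_getD]
      exact ih ((List.mem_cons.mp hv).resolve_left (fun he => hav he.symm))

theorem contains_pvState {ks : List Int} {h : Int → List (Int × Int)} {v : Int}
    (hv : v ∈ ks) : (pvState ks h).contains v = true := by
  rw [PySem.Dict.contains_iff_mem_keys]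
  simp [pvState, PySem.Dict.keys, hv]

theorem insert_pvState {ks : List Int} {h : Int → List (Int × Int)} {v : Int}
    (hv : v ∈ ks) (x : List (Int × Int)) :
    (pvState ks h).insert v x = pvState ks (Function.update h v x) := by
  apply PySem.Dict.ext
  rw [PySem.Dict.items_insert_of_contains _ _ (contains_pvState hv)]
  show (List.map _ (ks.map fun k => (k, h k))) = _
  rw [List.map_map]
  apply List.map_congr_left
  intro k _
  by_cases hkv : k = v
  · subst hkv; simp [Function.update]
  · simp [Function.update, hkv]

theorem pvRow_getD {tree : List (Int × List (Int × Int))} {L i j : Nat} {v : Int}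
    (hij : i ≤ j) (hiL : i < L) (d : Int × Int) :
    (pvRow tree L j v).getD i d = pvGetAlt tree i v := by
  unfold pvRow
  rw [List.getD_eq_getElem _ _ (by simpa using hiL)]
  simp [hij]

theorem pvRow_set {tree : List (Int × List (Int × Int))} {L j : Nat} {v : Int}
    (_hjL : j + 1 < L) :
    (pvRow tree L j v).set (j + 1) (pvGetAlt tree (j + 1) v) = pvRow tree L (j + 1) v := by
  apply List.ext_getElem
  · simp [pvRow]
  · intro i h1 h2
    rw [List.getElem_set]
    by_cases hie : j + 1 = i
    · subst hie; simp [pvRow]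
    · rw [if_neg hie]
      simp only [pvRow, List.getElem_map, List.getElem_range]
      by_cases hle : i ≤ j
      · rw [if_pos hle, if_pos (by omega)]
      · rw [if_neg hle, if_neg (by omega)]

theorem pvRow_stable {tree : List (Int × List (Int × Int))} {L j : Nat} {v : Int}
    (h : pvGetAlt tree (j + 1) v = (-1, 0)) :
    pvRow tree L (j + 1) v = pvRow tree L j v := by
  unfold pvRow
  apply List.map_congr_left
  intro i _
  by_cases hle : i ≤ j
  · rw [if_pos hle, if_pos (by omega)]
  · by_cases hie : i = j + 1
    · subst hie; simp [h]
    · rw [if_neg hle, if_neg (by omega)]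

theorem pvRow_zero {tree : List (Int × List (Int × Int))} {L : Nat} {v : Int} (_hL : 0 < L) :
    (List.replicate L ((-1 : Int), (0 : Int))).set 0 (pvGetAlt tree 0 v) = pvRow tree L 0 v := by
  apply List.ext_getElem
  · simp [pvRow]
  · intro i h1 h2
    rw [List.getElem_set]
    by_cases hie : 0 = i
    · subst hie; simp [pvRow]
    · rw [if_neg hie]
      simp only [pvRow, List.getElem_map, List.getElem_range, List.getElem_replicate]
      rw [if_neg (by omega)]

theorem pvRow_last {tree : List (Int × List (Int × Int))} {m : Nat} {v : Int} :
    pvRow tree (m + 1) m v = (List.range (m + 1)).map (fun j => pvGetAlt tree j v) := by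
  unfold pvRow
  apply List.map_congr_left
  intro i hi
  rw [if_pos (Nat.lt_succ_iff.mp (List.mem_range.mp hi))]

-- A lookup of a present key returns a value stored in the list
theorem getD_mk_of_mem {tree : List (Int × List (Int × Int))} {v : Int}
    (hv : v ∈ tree.map Prod.fst) :
    ∃ l, (v, l) ∈ tree ∧ PySem.Dict.getD (PySem.Dict.mk tree) v [] = l := by
  induction tree with
  | nil => simp at hv
  | cons a t ih =>
    rw [show (a :: t : List (Int × List (Int × Int))) = ((a.1, a.2) :: t) from rfl,
      PySem.Dict.getD_eq_get?_getD, PySem.Dict.get?_mk_cons]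
    by_cases hav : a.1 = v
    · exact ⟨a.2, by simp [← hav], by simp [hav]⟩
    · simp only [beq_iff_eq, hav, if_false]
      rw [← PySem.Dict.getD_eq_get?_getD]
      have hv' : v ∈ t.map Prod.fst := by
        rcases (by simpa using hv) with h1 | h1
        · exact absurd h1.symm hav
        · simpa using h1
      obtain ⟨l, hl1, hl2⟩ := ih hv'
      exact ⟨l, List.mem_cons_of_mem _ hl1, hl2⟩

-- parents stay inside the key set (or are -1), at every level
theorem pvClosure {tree : List (Int × List (Int × Int))}
    (hpre : Pre_process tree) (hlen : 1 < tree.length) :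
    ∀ j, ∀ v ∈ tree.map Prod.fst,
      (pvGetAlt tree j v).1 = -1 ∨ (pvGetAlt tree j v).1 ∈ tree.map Prod.fst := by
  intro j
  induction j with
  | zero =>
    intro v hv
    obtain ⟨l, hl1, hl2⟩ := getD_mk_of_mem hv
    have hpar := hpre.2.2.2 hlen (v, l) hl1
    cases l with
    | nil => exact absurd rfl (hpre.2.2.1 (v, []) hl1)
    | cons a t =>
      have hg : pvGetAlt tree 0 v = (a.1, a.2) := by
        rw [show pvGetAlt tree 0 v
            = (((PySem.Dict.getD (PySem.Dict.mk tree) v []).getD 0 (-1, 0)).1,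
               ((PySem.Dict.getD (PySem.Dict.mk tree) v []).getD 0 (-1, 0)).2) from rfl, hl2]
        rfl
      rw [hg]
      simpa using hpar
  | succ j ih =>
    intro v hv
    rw [pvGetAlt_succ]
    by_cases hp : (pvGetAlt tree j v).1 ≠ -1
    · rcases ih v hv with h1 | h1
      · exact absurd h1 hp
      · by_cases hq : (pvGetAlt tree j (pvGetAlt tree j v).1).1 ≠ -1
        · rcases ih _ h1 with h2 | h2
          · exact absurd h2 hq
          · rw [if_pos hp, if_pos hq]
            exact Or.inr h2
        · rw [if_pos hp, if_neg hq]
          exact Or.inl rfl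
    · rw [if_neg hp]
      exact Or.inl rfl

-- loop 1: each key's entry rebuilt from its own old value
theorem foldl_self_update {ks : List Int} (l : List Int) (hsub : ∀ x ∈ l, x ∈ ks)
    (hl : l.Nodup) (h : Int → List (Int × Int)) (F : Int → List (Int × Int) → List (Int × Int)) :
    l.foldl (fun d v => d.insert v (F v (d.getD v []))) (pvState ks h)
      = pvState ks (fun k => if k ∈ l then F k (h k) else h k) := by
  induction l generalizing h with
  | nil => simp [pvState]
  | cons v t ih =>
    have hv : v ∈ ks := hsub v (List.mem_cons_self ..)
    rw [List.foldl_cons, getD_pvState hv, insert_pvState hv]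
    rw [ih (fun x hx => hsub x (List.mem_cons_of_mem _ hx)) hl.of_cons]
    apply pvState_congr
    intro k _
    by_cases hkt : k ∈ t
    · have hkv : k ≠ v := fun he => (List.nodup_cons.mp hl).1 (he ▸ hkt)
      simp [hkt, Function.update, hkv]
    · by_cases hkv : k = v
      · subst hkv; simp [hkt, Function.update]
      · simp [hkt, hkv, Function.update]

-- loop 2, one inner pass: reads level j, writes level j + 1
theorem pvInnerGo {tree : List (Int × List (Int × Int))} {ks : List Int} {L j : Nat}
    (hjL : j + 1 < L)
    (hclo : ∀ v ∈ ks, (pvGetAlt tree j v).1 = -1 ∨ (pvGetAlt tree j v).1 ∈ ks)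
    (l : List Int) (hsub : ∀ x ∈ l, x ∈ ks) (hl : l.Nodup)
    (h : Int → List (Int × Int))
    (hread : ∀ k ∈ ks, h k = pvRow tree L j k ∨ h k = pvRow tree L (j + 1) k)
    (hpend : ∀ k ∈ l, h k = pvRow tree L j k) :
    l.foldl (fun d v =>
        if ((d.getD v []).getD j (-1, 0)).1 ≠ -1 then
          if ((d.getD ((d.getD v []).getD j (-1, 0)).1 []).getD j (-1, 0)).1 ≠ -1 then
            d.insert v ((d.getD v []).set (j + 1)
              (((d.getD ((d.getD v []).getD j (-1, 0)).1 []).getD j (-1, 0)).1,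
               max ((d.getD v []).getD j (-1, 0)).2
                   ((d.getD ((d.getD v []).getD j (-1, 0)).1 []).getD j (-1, 0)).2))
          else d
        else d) (pvState ks h)
      = pvState ks (fun k => if k ∈ l then pvRow tree L (j + 1) k else h k) := by
  induction l generalizing h with
  | nil => simp [pvState]
  | cons v t ih =>
    have hv : v ∈ ks := hsub v (List.mem_cons_self ..)
    have hhv : h v = pvRow tree L j v := hpend v (List.mem_cons_self ..)
    have hpv : ((pvState ks h).getD v []).getD j (-1, 0) = pvGetAlt tree j v := by
      rw [getD_pvState hv, hhv, pvRow_getD (le_refl j) (by omega)]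
    -- common continuation: the state after this step, under any h' that agrees off v
    have hnext :
        ∀ h' : Int → List (Int × Int),
          (∀ k ∈ ks, h' k = pvRow tree L j k ∨ h' k = pvRow tree L (j + 1) k) →
          (∀ k ∈ t, h' k = pvRow tree L j k) →
          (h' v = pvRow tree L (j + 1) v) →
          (∀ k, k ≠ v → h' k = h k) →
          t.foldl (fun d v =>
              if ((d.getD v []).getD j (-1, 0)).1 ≠ -1 then
                if ((d.getD ((d.getD v []).getD j (-1, 0)).1 []).getD j (-1, 0)).1 ≠ -1 then
                  d.insert v ((d.getD v []).set (j + 1)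
                    (((d.getD ((d.getD v []).getD j (-1, 0)).1 []).getD j (-1, 0)).1,
                     max ((d.getD v []).getD j (-1, 0)).2
                         ((d.getD ((d.getD v []).getD j (-1, 0)).1 []).getD j (-1, 0)).2))
                else d
              else d) (pvState ks h')
            = pvState ks (fun k => if k ∈ v :: t then pvRow tree L (j + 1) k else h k) := by
      intro h' hr hp hv' hoff
      rw [ih (fun x hx => hsub x (List.mem_cons_of_mem _ hx)) hl.of_cons h' hr hp]
      apply pvState_congr
      intro k _
      by_cases hkt : k ∈ t
      · simp [hkt]
      · by_cases hkv : k = v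
        · subst hkv; simp [hkt, hv']
        · simp [hkt, hkv, hoff k hkv]
    simp only [List.foldl_cons]
    by_cases hp1 : (pvGetAlt tree j v).1 ≠ -1
    · -- parent exists; read its level-j entry
      rcases hclo v hv with hc | hc
      · exact absurd hc hp1
      have hq : ((pvState ks h).getD (pvGetAlt tree j v).1 []).getD j (-1, 0)
          = pvGetAlt tree j (pvGetAlt tree j v).1 := by
        rw [getD_pvState hc]
        rcases hread _ hc with h1 | h1 <;>
          rw [h1, pvRow_getD (by omega) (by omega)]
      by_cases hq1 : (pvGetAlt tree j (pvGetAlt tree j v).1).1 ≠ -1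
      · -- both guards pass: write level j + 1
        have hval : pvGetAlt tree (j + 1) v
            = ((pvGetAlt tree j (pvGetAlt tree j v).1).1,
               max (pvGetAlt tree j v).2 (pvGetAlt tree j (pvGetAlt tree j v).1).2) := by
          rw [pvGetAlt_succ, if_pos hp1, if_pos hq1]
        rw [hpv, if_pos hp1, hq, if_pos hq1, getD_pvState hv, hhv, ← hval,
          pvRow_set hjL, insert_pvState hv]
        apply hnext
        · intro k hk
          by_cases hkv : k = v
          · subst hkv; simp [Function.update]
          · rw [Function.update_of_ne hkv]; exact hread k hk
        · intro k hk
          have hkv : k ≠ v := fun he => (List.nodup_cons.mp hl).1 (he ▸ hk)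
          rw [Function.update_of_ne hkv]; exact hpend k (List.mem_cons_of_mem _ hk)
        · simp [Function.update]
        · intro k hkv; rw [Function.update_of_ne hkv]
      · -- second guard fails: entry stays default, the level-(j+1) value is (-1, 0)
        have hval : pvGetAlt tree (j + 1) v = (-1, 0) := by
          rw [pvGetAlt_succ, if_pos hp1, if_neg hq1]
        rw [hpv, if_pos hp1, hq, if_neg hq1]
        exact hnext h hread (fun k hk => hpend k (List.mem_cons_of_mem _ hk))
          (by rw [hhv, ← pvRow_stable hval]) (fun _ _ => rfl)
    · -- first guard fails
      have hval : pvGetAlt tree (j + 1) v = (-1, 0) := by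
        rw [pvGetAlt_succ, if_neg hp1]
      rw [hpv, if_neg hp1]
      exact hnext h hread (fun k hk => hpend k (List.mem_cons_of_mem _ hk))
        (by rw [hhv, ← pvRow_stable hval]) (fun _ _ => rfl)

-- loop 2, outer: after levels 1 … m the table holds pvRow m
theorem pvOuterGo {tree : List (Int × List (Int × Int))} {ks : List Int} {L : Nat}
    (hnd : ks.Nodup) (m : Nat) (hm : m < L)
    (hclo : ∀ j, j + 1 ≤ m → ∀ v ∈ ks,
      (pvGetAlt tree j v).1 = -1 ∨ (pvGetAlt tree j v).1 ∈ ks) :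
    (PySem.List.pyRange 1 ((m + 1 : Nat) : Int) 1).foldl (fun d j =>
        ks.foldl (fun d v =>
          if ((d.getD v []).getD (j - 1).toNat (-1, 0)).1 ≠ -1 then
            if ((d.getD ((d.getD v []).getD (j - 1).toNat (-1, 0)).1 []).getD (j - 1).toNat (-1, 0)).1 ≠ -1 then
              d.insert v ((d.getD v []).set ((j - 1).toNat + 1)
                (((d.getD ((d.getD v []).getD (j - 1).toNat (-1, 0)).1 []).getD (j - 1).toNat (-1, 0)).1,
                 max ((d.getD v []).getD (j - 1).toNat (-1, 0)).2
                     ((d.getD ((d.getD v []).getD (j - 1).toNat (-1, 0)).1 []).getD (j - 1).toNat (-1, 0)).2))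
            else d
          else d) d) (pvState ks (pvRow tree L 0))
      = pvState ks (pvRow tree L m) := by
  induction m with
  | zero =>
    rw [show ((0 + 1 : Nat) : Int) = 1 from rfl, PySem.List.pyRange_one_eq_nil (le_refl 1)]
    rfl
  | succ m ih =>
    rw [show ((m + 1 + 1 : Nat) : Int) = ((m + 1 : Nat) : Int) + 1 by push_cast; ring,
      PySem.List.pyRange_one_succ_right (by omega), List.foldl_append,
      ih (by omega) (fun j hj => hclo j (by omega))]
    simp only [List.foldl_cons, List.foldl_nil,
      show (((m + 1 : Nat) : Int) - 1).toNat = m by omega]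
    rw [pvInnerGo hm (hclo m (le_refl _)) ks (fun x hx => hx) hnd _
      (fun k _ => Or.inl rfl) (fun k _ => rfl)]
    exact pvState_congr (fun k hk => by simp [hk])

-- ===== VERDICT (by name: the statement is the Claim_ definition above) =====
theorem process_spec : Claim_equal_process := by
  intro tree hdom hpre
  unfold Spec_process
  show process tree = process_alt tree
  obtain ⟨hne, hnd', hval, hpar⟩ := hpre
  simp only [process, process_alt]
  have hks : PySem.Dict.keys (PySem.Dict.mk tree) = tree.map Prod.fst := rfl
  set N := tree.length with hN
  set L := Nat.log2 N + 1 with hL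
  set ks := PySem.Dict.keys (PySem.Dict.mk tree) with hksdef
  have hnd : ks.Nodup := by rw [hks] at *; exact hnd'
  -- up0
  have h0 : ks.foldl (fun d k => d.insert k (List.replicate L ((-1 : Int), (0 : Int)))) (PySem.Dict.mk [])
      = pvState ks (fun _ => List.replicate L ((-1 : Int), (0 : Int))) := by
    apply PySem.Dict.ext
    rw [show (PySem.Dict.mk ([] : List (Int × List (Int × Int)))) = PySem.Dict.empty from rfl]
    rw [PySem.Dict.items_foldl_insert_fresh (k := fun a => a) _ _ _
      (fun a _ => PySem.Dict.contains_empty a) (by simpa using hnd)]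
    simp [pvState]
    rfl
  rw [h0]
  -- up1
  rw [foldl_self_update ks (fun x hx => hx) hnd _
    (fun v old => old.set 0
      (((PySem.Dict.getD (PySem.Dict.mk tree) v []).getD 0 (-1, 0)).1,
       ((PySem.Dict.getD (PySem.Dict.mk tree) v []).getD 0 (-1, 0)).2))]
  have h1 : pvState ks (fun k => if k ∈ ks then
        (List.replicate L ((-1 : Int), (0 : Int))).set 0
          (((PySem.Dict.getD (PySem.Dict.mk tree) k []).getD 0 (-1, 0)).1,
           ((PySem.Dict.getD (PySem.Dict.mk tree) k []).getD 0 (-1, 0)).2)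
        else List.replicate L ((-1 : Int), (0 : Int)))
      = pvState ks (pvRow tree L 0) := by
    apply pvState_congr
    intro k hk
    rw [if_pos hk]
    exact pvRow_zero (by omega)
  rw [h1]
  -- up2: the two nested level loops
  have hlog : L = Nat.log2 N + 1 := hL
  rw [show (L : Int) = ((Nat.log2 N + 1 : Nat) : Int) from rfl]
  rw [pvOuterGo hnd (Nat.log2 N) (by omega) (fun j hj v hv => by
    have hlen : 1 < tree.length := by
      by_contra hle
      have h1 : tree.length = 1 := by
        rcases tree with _ | ⟨a, t⟩; · exact absurd rfl hne
        simp at hle ⊢; omega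
      have : Nat.log2 N = 0 := by rw [hN, h1]; rfl
      omega
    have := pvClosure ⟨hne, hnd', hval, hpar⟩ hlen j v (by rwa [hks] at hv)
    rwa [← hks] at this)]
  -- final shape
  show (pvState ks (pvRow tree L (Nat.log2 N))).items = _
  unfold pvState
  rw [show (PySem.Dict.mk (ks.map fun k => (k, pvRow tree L (Nat.log2 N) k))).items
      = ks.map fun k => (k, pvRow tree L (Nat.log2 N) k) from rfl]
  apply List.map_congr_left
  intro k _
  rw [hL, pvRow_last]
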